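-- pv_equiv track=rewrite | github.com/dacostaortiz/FT-VAE-Model | preproc.py | replace_non_zero_with_order
-- ===== SOURCE A (Python) =====
-- def replace_non_zero_with_order(vector):
--     non_zero_values = [value for value in vector if value != 0]
--     sorted_indices = sorted(range(len(non_zero_values)), key=lambda k: non_zero_values[k])
--
--     sequential_order = 0
--     result_vector = []
--
--     for value in vector:
--         if value != 0:
--             result_vector.append(sorted_indices.index(sequential_order) + 1)
--             sequential_order += 1
--         else:
--             result_vector.append(0)
--
--     return result_vector
-- ===== SOURCE B (Python) =====
-- def replace_non_zero_with_order(vector):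
--     # Sort the (value, original index) pairs of the non-zero entries once,
--     # then scatter ranks back: removes the per-element .index scan of A.
--     pairs = [(v, i) for i, v in enumerate(vector) if v != 0]
--     pairs.sort(key=lambda p: p[0])
--     result = [0] * len(vector)
--     for rank, (_, i) in enumerate(pairs):
--         result[i] = rank + 1
--     return result
-- ===== Notes on version B (the rewrite author's own statement) =====
-- stated objective: faster
-- what changed: Instead of scanning sorted_indices with list.index once per non-zero element, B stable-sorts the (value, original index) pairs once and scatters rank+1 back by original index in a single pass.
import Mathlib
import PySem

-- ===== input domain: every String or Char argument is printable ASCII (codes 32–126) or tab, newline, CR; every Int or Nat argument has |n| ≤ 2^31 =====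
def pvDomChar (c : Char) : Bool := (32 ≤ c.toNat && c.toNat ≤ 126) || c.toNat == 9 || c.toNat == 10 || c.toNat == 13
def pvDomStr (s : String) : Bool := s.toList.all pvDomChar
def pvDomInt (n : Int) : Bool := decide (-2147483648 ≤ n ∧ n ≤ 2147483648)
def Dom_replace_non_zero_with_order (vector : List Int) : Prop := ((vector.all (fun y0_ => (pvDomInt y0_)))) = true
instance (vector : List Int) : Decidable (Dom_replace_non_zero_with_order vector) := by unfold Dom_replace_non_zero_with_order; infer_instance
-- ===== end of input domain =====

-- B replaces A's per-element list.index scan by one stable sort of (value, original index)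
-- pairs followed by a single scatter of ranks (objective: faster).

-- ===== PORT A =====
def replace_non_zero_with_order (vector : List Int) : List Int :=
  let non_zero_values := vector.filter (fun value => value ≠ 0)
  let sorted_indices := PySem.List.sorted
      (PySem.List.pyRange 0 (non_zero_values.length : Int) 1)
      (fun k => PySem.List.pyGetD non_zero_values k 0)
  -- sorted_indices.index(sequential_order) never raises (sequential_order < len(non_zero_values)),
  -- so the `.getD 0` default is unreachable.
  (vector.foldl
    (fun (st : Int × List Int) value =>
      if value ≠ 0 then
        (st.1 + 1, st.2 ++ [((((PySem.List.index? sorted_indices st.1).getD 0 : Nat) : Int) + 1)])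
      else
        (st.1, st.2 ++ [(0 : Int)]))
    (0, [])).2

-- ===== PORT B =====
def replace_non_zero_with_order_alt (vector : List Int) : List Int :=
  let pairs := (PySem.List.enumerate vector 0).filterMap
      (fun p => if p.2 ≠ 0 then some (p.2, p.1) else none)
  let spairs := PySem.List.sorted pairs (fun p => p.1)
  -- result[i] = rank + 1; i is a valid non-negative index, so pySetD is exact.
  (PySem.List.enumerate spairs 0).foldl
    (fun res rp => PySem.List.pySetD res rp.2.2 (((rp.1 : Int)) + 1))
    (List.replicate vector.length (0 : Int))

-- ===== PRECONDITION & SPEC =====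
def Spec_replace_non_zero_with_order (vector : List Int) (out : List Int) : Prop := out = replace_non_zero_with_order_alt vector
instance (vector : List Int) (out : List Int) : Decidable (Spec_replace_non_zero_with_order vector out) := by unfold Spec_replace_non_zero_with_order; infer_instance

-- ===== CLAIM (what is proved, stated in full; the proofs are below) =====
def Claim_equal_replace_non_zero_with_order : Prop := ∀ (vector : List Int), Dom_replace_non_zero_with_order vector → Spec_replace_non_zero_with_order vector (replace_non_zero_with_order vector)

-- ===== LEMMAS AND PROOFS =====

-- the original indices of the non-zero entries, in order (B's pairs, second components)
def oidxF (l : List Int) (s : Int) : List Int :=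
  (PySem.List.enumerate l s).filterMap (fun p => if p.2 ≠ 0 then some p.1 else none)

-- B's pairs list
def pairsF (l : List Int) (s : Int) : List (Int × Int) :=
  (PySem.List.enumerate l s).filterMap (fun p => if p.2 ≠ 0 then some (p.2, p.1) else none)

-- A's loop, written structurally
def aLoop (si : List Int) : List Int → Int → List Int
  | [], _ => []
  | v :: t, s =>
    if v ≠ 0 then ((((PySem.List.index? si s).getD 0 : Nat) : Int) + 1) :: aLoop si t (s + 1)
    else (0 : Int) :: aLoop si t s

theorem map_fst_pairsF (l : List Int) (s : Int) :
    (pairsF l s).map Prod.fst = l.filter (fun v => decide (v ≠ 0)) := by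
  induction l generalizing s with
  | nil => rfl
  | cons v t ih =>
    by_cases hv : v = 0
    · simpa [pairsF, PySem.List.enumerate_cons, hv, List.filter_cons] using ih (s + 1)
    · simpa [pairsF, PySem.List.enumerate_cons, hv, List.filter_cons] using ih (s + 1)

theorem map_snd_pairsF (l : List Int) (s : Int) :
    (pairsF l s).map Prod.snd = oidxF l s := by
  induction l generalizing s with
  | nil => rfl
  | cons v t ih =>
    by_cases hv : v = 0
    · simpa [pairsF, oidxF, PySem.List.enumerate_cons, hv] using ih (s + 1)
    · simpa [pairsF, oidxF, PySem.List.enumerate_cons, hv] using ih (s + 1)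

theorem mem_oidxF (l : List Int) (s x : Int) :
    x ∈ oidxF l s ↔ ∃ (q : Nat) (h : q < l.length), x = s + q ∧ l[q] ≠ 0 := by
  induction l generalizing s with
  | nil => simp [oidxF, PySem.List.enumerate_nil]
  | cons v t ih =>
    by_cases hv : v = 0
    · rw [show oidxF (v :: t) s = oidxF t (s + 1) by
        simp [oidxF, PySem.List.enumerate_cons, hv]]
      rw [ih (s + 1)]
      constructor
      · rintro ⟨q, hq, rfl, hnz⟩
        exact ⟨q + 1, by simpa using hq, by push_cast; ring, by simpa using hnz⟩
      · rintro ⟨q, hq, hx, hnz⟩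
        cases q with
        | zero => simp [hv] at hnz
        | succ q' =>
          exact ⟨q', by simpa using hq, by rw [hx]; push_cast; ring, by simpa using hnz⟩
    · rw [show oidxF (v :: t) s = s :: oidxF t (s + 1) by
        simp [oidxF, PySem.List.enumerate_cons, hv]]
      rw [List.mem_cons, ih (s + 1)]
      constructor
      · rintro (rfl | ⟨q, hq, rfl, hnz⟩)
        · exact ⟨0, by simp, by simp, by simpa using hv⟩
        · exact ⟨q + 1, by simpa using hq, by push_cast; ring, by simpa using hnz⟩
      · rintro ⟨q, hq, hx, hnz⟩
        cases q with
        | zero => left; simpa using hx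
        | succ q' =>
          right
          exact ⟨q', by simpa using hq, by rw [hx]; push_cast; ring, by simpa using hnz⟩

theorem nodup_oidxF (l : List Int) (s : Int) : (oidxF l s).Nodup := by
  induction l generalizing s with
  | nil => simp [oidxF, PySem.List.enumerate_nil]
  | cons v t ih =>
    by_cases hv : v = 0
    · rw [show oidxF (v :: t) s = oidxF t (s + 1) by
        simp [oidxF, PySem.List.enumerate_cons, hv]]
      exact ih (s + 1)
    · rw [show oidxF (v :: t) s = s :: oidxF t (s + 1) by
        simp [oidxF, PySem.List.enumerate_cons, hv]]
      refine List.nodup_cons.mpr ⟨fun hmem => ?_, ih (s + 1)⟩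
      obtain ⟨q, hq, habs, -⟩ := (mem_oidxF t (s + 1) s).mp hmem
      omega

theorem length_oidxF (l : List Int) (s : Int) :
    (oidxF l s).length = (l.filter (fun v => decide (v ≠ 0))).length := by
  rw [← map_snd_pairsF, ← map_fst_pairsF l s]
  simp

theorem getElem?_oidxF (l : List Int) (s : Int) (p : Nat) (hp : p < l.length)
    (hnz : l[p] ≠ 0) :
    (oidxF l s)[(l.take p).countP (fun v => decide (v ≠ 0))]? = some (s + p) := by
  induction l generalizing s p with
  | nil => simp at hp
  | cons v t ih =>
    cases p with
    | zero =>
      have hv : ¬ v = 0 := by simpa using hnz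
      rw [show oidxF (v :: t) s = s :: oidxF t (s + 1) by
        simp [oidxF, PySem.List.enumerate_cons, hv]]
      simp
    | succ q =>
      have hq : q < t.length := by simpa using hp
      have hnz' : t[q] ≠ 0 := by simpa using hnz
      rw [List.take_succ_cons, List.countP_cons]
      by_cases hv : v = 0
      · rw [show oidxF (v :: t) s = oidxF t (s + 1) by
          simp [oidxF, PySem.List.enumerate_cons, hv]]
        rw [show (decide (v ≠ 0)) = false by simp [hv]]
        simp only [Bool.false_eq_true, if_false, Nat.add_zero]
        rw [ih (s + 1) q hq hnz']
        congr 1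
        push_cast; omega
      · rw [show oidxF (v :: t) s = s :: oidxF t (s + 1) by
          simp [oidxF, PySem.List.enumerate_cons, hv]]
        rw [show (decide (v ≠ 0)) = true by simp [hv]]
        simp only [if_true]
        rw [List.getElem?_cons_succ, ih (s + 1) q hq hnz']
        congr 1
        push_cast; omega

theorem insertBy_map {α β : Type} (f : α → β) (b : α → α → Bool) (bf : β → β → Bool)
    (h : ∀ a a', bf (f a) (f a') = b a a') (x : α) (l : List α) :
    PySem.List.insertBy bf (f x) (l.map f) = (PySem.List.insertBy b x l).map f := by
  induction l with
  | nil => simp [PySem.List.insertBy]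
  | cons y ys ih =>
    simp only [List.map_cons, PySem.List.insertBy, h x y, ih]
    split <;> simp

theorem sorted_map {α β κ : Type} [LT κ] [DecidableLT κ] (f : α → β) (key : β → κ)
    (xs : List α) :
    PySem.List.sorted (xs.map f) key = (PySem.List.sorted xs (fun a => key (f a))).map f := by
  rw [PySem.List.sorted_eq_foldl_insertBy, PySem.List.sorted_eq_foldl_insertBy]
  have main : ∀ (ys : List α) (acc : List α),
      (ys.map f).foldl
          (fun a x => PySem.List.insertBy (fun p q => decide (key p < key q)) x a) (acc.map f)
        = (ys.foldl
            (fun a x =>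
              PySem.List.insertBy (fun p q => decide (key (f p) < key (f q))) x a) acc).map f := by
    intro ys
    induction ys with
    | nil => intro acc; rfl
    | cons y t ih =>
      intro acc
      simp only [List.map_cons, List.foldl_cons]
      rw [insertBy_map f _ _ (fun a a' => rfl), ih]
  simpa using main xs []

theorem index?_map_of_unique {l : List Int} {f : Int → Int} {y j : Int}
    (hj : j ∈ l) (hf : f j = y) (huniq : ∀ k ∈ l, f k = y → k = j) :
    PySem.List.index? (l.map f) y = PySem.List.index? l j := by
  induction l with
  | nil => cases hj
  | cons a t ih =>
    by_cases haj : a = j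
    · subst haj
      rw [List.map_cons, hf, PySem.List.index?_cons_self, PySem.List.index?_cons_self]
    · have hfa : f a ≠ y := fun he => haj (huniq a List.mem_cons_self he)
      have hj' : j ∈ t := by
        rcases List.mem_cons.mp hj with h | h
        · exact absurd h.symm haj
        · exact h
      rw [List.map_cons, PySem.List.index?_cons_of_ne _ hfa,
        PySem.List.index?_cons_of_ne _ haj,
        ih hj' (fun k hk he => huniq k (List.mem_cons_of_mem _ hk) he)]

theorem index?_map_eq_none {l : List Int} {f : Int → Int} {y : Int}
    (h : ∀ k ∈ l, f k ≠ y) :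
    PySem.List.index? (l.map f) y = none := by
  rw [PySem.List.index?_eq_none_iff]
  intro hmem
  obtain ⟨k, hk, hfk⟩ := List.mem_map.mp hmem
  exact h k hk hfk

theorem aLoop_foldl (si : List Int) (l : List Int) (s : Int) (acc : List Int) :
    (l.foldl
      (fun (st : Int × List Int) value =>
        if value ≠ 0 then
          (st.1 + 1, st.2 ++ [((((PySem.List.index? si st.1).getD 0 : Nat) : Int) + 1)])
        else
          (st.1, st.2 ++ [(0 : Int)]))
      (s, acc)).2 = acc ++ aLoop si l s := by
  induction l generalizing s acc with
  | nil => simp [aLoop]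
  | cons v t ih =>
    rw [List.foldl_cons]
    by_cases hv : v = 0
    · rw [if_neg (by simp [hv])]
      dsimp only
      rw [ih, show aLoop si (v :: t) s = (0 : Int) :: aLoop si t s by simp [aLoop, hv]]
      simp
    · rw [if_pos hv]
      dsimp only
      rw [ih, show aLoop si (v :: t) s
            = ((((PySem.List.index? si s).getD 0 : Nat) : Int) + 1) :: aLoop si t (s + 1) by
          simp [aLoop, hv]]
      simp

theorem length_aLoop (si : List Int) (l : List Int) (s : Int) :
    (aLoop si l s).length = l.length := by
  induction l generalizing s with
  | nil => rfl
  | cons v t ih => by_cases hv : v = 0 <;> simp [aLoop, hv, ih]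

theorem getElem?_aLoop (si : List Int) (l : List Int) (s : Int) (p : Nat)
    (hp : p < l.length) :
    (aLoop si l s)[p]? =
      some (if l[p] = 0 then (0 : Int)
            else (((PySem.List.index? si (s + ((l.take p).countP (fun v => decide (v ≠ 0)) : Nat))).getD 0 : Nat) : Int) + 1) := by
  induction l generalizing s p with
  | nil => simp at hp
  | cons v t ih =>
    cases p with
    | zero => by_cases hv : v = 0 <;> simp [aLoop, hv]
    | succ q =>
      have hq : q < t.length := by simpa using hp
      rw [List.take_succ_cons, List.countP_cons, List.getElem_cons_succ]
      by_cases hv : v = 0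
      · rw [show aLoop si (v :: t) s = (0 : Int) :: aLoop si t s by simp [aLoop, hv]]
        rw [show (decide (v ≠ 0)) = false by simp [hv]]
        simp only [Bool.false_eq_true, if_false, Nat.add_zero]
        rw [List.getElem?_cons_succ]
        exact ih s q hq
      · rw [show aLoop si (v :: t) s
            = ((((PySem.List.index? si s).getD 0 : Nat) : Int) + 1) :: aLoop si t (s + 1) by
          simp [aLoop, hv]]
        rw [show (decide (v ≠ 0)) = true by simp [hv]]
        simp only [if_true]
        rw [List.getElem?_cons_succ, ih (s + 1) q hq,
          show s + (((t.take q).countP (fun v => decide (v ≠ 0)) + 1 : Nat) : Int)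
              = s + 1 + (((t.take q).countP (fun v => decide (v ≠ 0)) : Nat) : Int) by
            push_cast; omega]

theorem scatter_length (l : List (Int × Int)) (res : List Int) (s : Int) :
    ((PySem.List.enumerate l s).foldl
      (fun res rp => PySem.List.pySetD res rp.2.2 (rp.1 + 1)) res).length = res.length := by
  induction l generalizing res s with
  | nil => rfl
  | cons pr t ih =>
    rw [PySem.List.enumerate_cons, List.foldl_cons, ih]
    simp [PySem.List.length_pySetD]

theorem scatter_getElem? (l : List (Int × Int)) (res : List Int) (s : Int)
    (h1 : ∀ pr ∈ l, 0 ≤ pr.2 ∧ pr.2 < (res.length : Int))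
    (h2 : (l.map Prod.snd).Nodup) (p : Nat) (hp : p < res.length) :
    ((PySem.List.enumerate l s).foldl
      (fun res rp => PySem.List.pySetD res rp.2.2 (rp.1 + 1)) res)[p]? =
      match PySem.List.index? (l.map Prod.snd) (p : Int) with
      | some r => some (s + (r : Int) + 1)
      | none => res[p]? := by
  induction l generalizing res s with
  | nil => simp [PySem.List.enumerate_nil]
  | cons pr t ih =>
    obtain ⟨v, i⟩ := pr
    have hi : 0 ≤ i ∧ i < (res.length : Int) := h1 (v, i) List.mem_cons_self
    have hset : PySem.List.pySetD res i (s + 1) = res.set i.toNat (s + 1) :=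
      PySem.List.pySetD_of_nonneg res (s + 1) hi.1
    have hlen' : (res.set i.toNat (s + 1)).length = res.length := by simp
    have h2' : (i :: t.map Prod.snd).Nodup := by simpa using h2
    have h2c := List.nodup_cons.mp h2'
    rw [PySem.List.enumerate_cons, List.foldl_cons]
    dsimp only
    rw [hset, ih (res.set i.toNat (s + 1)) (s + 1)
      (fun q hq => by rw [hlen']; exact h1 q (List.mem_cons_of_mem _ hq)) h2c.2
      (by omega)]
    simp only [List.map_cons]
    by_cases hpi : (p : Int) = i
    · have hnone : PySem.List.index? (t.map Prod.snd) (p : Int) = none := by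
        rw [PySem.List.index?_eq_none_iff, hpi]
        exact h2c.1
      rw [hnone, ← hpi, PySem.List.index?_cons_self]
      have hpt : ((p : Int)).toNat = p := by omega
      rw [hpt]
      simp only [List.getElem?_set_self hp]
      norm_num
    · have hne : i ≠ (p : Int) := fun h => hpi h.symm
      rw [PySem.List.index?_cons_of_ne _ hne]
      cases hcase : PySem.List.index? (t.map Prod.snd) (p : Int) with
      | some r =>
        simp only [Option.map_some, Option.some.injEq]
        push_cast; omega
      | none =>
        simp only [Option.map_none]
        rw [List.getElem?_set_ne (by omega)]

theorem main_eq (vector : List Int) :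
    replace_non_zero_with_order vector = replace_non_zero_with_order_alt vector := by
  set nz := vector.filter (fun v => decide (v ≠ 0)) with hnz
  set n := nz.length with hn
  set oidx := oidxF vector 0 with hoidx
  set g := (fun k : Int => (PySem.List.pyGetD nz k 0, PySem.List.pyGetD oidx k 0)) with hg
  set si := PySem.List.sorted (PySem.List.pyRange 0 (n : Int) 1)
      (fun k => PySem.List.pyGetD nz k 0) with hsi
  have hleno : oidx.length = n := by
    rw [hoidx, hn, hnz]; exact length_oidxF vector 0
  have hoidxnodup : oidx.Nodup := by rw [hoidx]; exact nodup_oidxF vector 0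
  -- A's code is aLoop
  have hA : replace_non_zero_with_order vector = aLoop si vector 0 := by
    simp only [replace_non_zero_with_order]
    rw [aLoop_foldl, List.nil_append, hsi, hn, hnz]
  -- B's code is the scatter fold over the sorted pairs
  have hB : replace_non_zero_with_order_alt vector
      = (PySem.List.enumerate (PySem.List.sorted (pairsF vector 0) (fun p => p.1)) 0).foldl
          (fun res rp => PySem.List.pySetD res rp.2.2 (rp.1 + 1))
          (List.replicate vector.length (0 : Int)) := by
    simp only [replace_non_zero_with_order_alt, pairsF]
  -- the pairs are g applied to range(n)
  have hlenp : (pairsF vector 0).length = n := by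
    have h := congrArg List.length (map_fst_pairsF vector 0)
    rw [List.length_map] at h
    rw [hn, hnz]; exact h
  have hpairs : pairsF vector 0 = (PySem.List.pyRange 0 (n : Int) 1).map g := by
    apply List.ext_getElem?
    intro k
    by_cases hk : k < n
    · have hk1 : k < (pairsF vector 0).length := by omega
      have hkr : k < (PySem.List.pyRange 0 (n : Int) 1).length := by
        rw [PySem.List.length_pyRange_one]; omega
      have hknz : k < nz.length := by omega
      have hko : k < oidx.length := by omega
      rw [List.getElem?_eq_getElem hk1, List.getElem?_map,
        List.getElem?_eq_getElem hkr, Option.map_some,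
        PySem.List.getElem_pyRange_one _ _ _ hkr]
      have hfst : (pairsF vector 0)[k].1 = nz[k] := by
        have h := congrArg (fun l => l[k]?) (map_fst_pairsF vector 0)
        simp only [List.getElem?_map] at h
        rw [List.getElem?_eq_getElem hk1] at h
        rw [← hnz, List.getElem?_eq_getElem hknz] at h
        simpa using h
      have hsnd : (pairsF vector 0)[k].2 = oidx[k] := by
        have h := congrArg (fun l => l[k]?) (map_snd_pairsF vector 0)
        simp only [List.getElem?_map] at h
        rw [List.getElem?_eq_getElem hk1] at h
        rw [← hoidx, List.getElem?_eq_getElem hko] at h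
        simpa using h
      have hgk : g (0 + (k : Int)) = (nz[k], oidx[k]) := by
        rw [hg]
        show (PySem.List.pyGetD nz (0 + (k : Int)) 0,
          PySem.List.pyGetD oidx (0 + (k : Int)) 0) = _
        rw [zero_add, PySem.List.pyGetD_natCast, PySem.List.pyGetD_natCast,
          List.getD_eq_getElem _ _ hknz, List.getD_eq_getElem _ _ hko]
      rw [hgk]
      exact congrArg some (Prod.ext hfst hsnd)
    · rw [List.getElem?_eq_none (by omega), List.getElem?_eq_none (by
        rw [List.length_map, PySem.List.length_pyRange_one]; omega)]
  -- the sorted pairs are g applied to A's sorted indices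
  have hspairs : PySem.List.sorted (pairsF vector 0) (fun p => p.1) = si.map g := by
    rw [hpairs, sorted_map g (fun p : Int × Int => p.1)]
  -- facts about si
  have hsiperm : si.Perm (PySem.List.pyRange 0 (n : Int) 1) := by
    rw [hsi]; exact PySem.List.sorted_perm _ _ _
  have hsimem : ∀ x, x ∈ si ↔ (0 ≤ x ∧ x < (n : Int)) := by
    intro x; rw [hsiperm.mem_iff, PySem.List.mem_pyRange_one]
  have hsinodup : si.Nodup := hsiperm.nodup_iff.mpr (PySem.List.nodup_pyRange_one _ _)
  -- evaluating the lookup function on in-range arguments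
  have heval : ∀ k : Int, 0 ≤ k → k < (n : Int) →
      ∀ hkt : k.toNat < oidx.length, PySem.List.pyGetD oidx k 0 = oidx[k.toNat] := by
    intro k hk0 hkn hkt
    have h1 : PySem.List.pyGetD oidx ((k.toNat : Nat) : Int) 0 = oidx[k.toNat] := by
      rw [PySem.List.pyGetD_natCast, List.getD_eq_getElem]
    have h2 : ((k.toNat : Nat) : Int) = k := by omega
    rw [h2] at h1
    exact h1
  have hcomp : (Prod.snd ∘ g) = (fun k : Int => PySem.List.pyGetD oidx k 0) := by
    funext a; rw [hg]; rfl
  -- scatter hypotheses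
  have hargs1 : ∀ pr ∈ si.map g, 0 ≤ pr.2 ∧
      pr.2 < ((List.replicate vector.length (0 : Int)).length : Int) := by
    intro pr hpr
    obtain ⟨k, hk, rfl⟩ := List.mem_map.mp hpr
    obtain ⟨hk0, hkn⟩ := (hsimem k).mp hk
    have hkt : k.toNat < oidx.length := by omega
    have h2 : (g k).2 = PySem.List.pyGetD oidx k 0 := by rw [hg]
    rw [h2, heval k hk0 hkn hkt]
    have hmem2 : oidx[k.toNat] ∈ oidxF vector 0 := List.getElem_mem _
    obtain ⟨q, hq, he, -⟩ := (mem_oidxF vector 0 _).mp hmem2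
    refine ⟨by omega, ?_⟩
    simp only [List.length_replicate]
    omega
  have hargs2 : ((si.map g).map Prod.snd).Nodup := by
    rw [List.map_map, hcomp]
    apply List.Nodup.map_on _ hsinodup
    intro x hx y hy hxy
    obtain ⟨hx0, hxn⟩ := (hsimem x).mp hx
    obtain ⟨hy0, hyn⟩ := (hsimem y).mp hy
    have hxt : x.toNat < oidx.length := by omega
    have hyt : y.toNat < oidx.length := by omega
    rw [heval x hx0 hxn hxt, heval y hy0 hyn hyt] at hxy
    have := (hoidxnodup.getElem_inj_iff).mp hxy
    omega
  -- pointwise comparison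
  rw [hA, hB, hspairs]
  have hlenA : (aLoop si vector 0).length = vector.length := length_aLoop si vector 0
  have hlenB : ((PySem.List.enumerate (si.map g) 0).foldl
      (fun res rp => PySem.List.pySetD res rp.2.2 (rp.1 + 1))
      (List.replicate vector.length (0 : Int))).length = vector.length := by
    rw [scatter_length]; simp
  apply List.ext_getElem?
  intro p
  by_cases hp : p < vector.length
  · rw [getElem?_aLoop si vector 0 p hp,
      scatter_getElem? (si.map g) _ 0 hargs1 hargs2 p (by simpa using hp),
      List.map_map, hcomp]
    simp only [zero_add]
    set jn := (vector.take p).countP (fun v => decide (v ≠ 0)) with hjn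
    by_cases hz : vector[p] = 0
    · have hnone : PySem.List.index?
          (si.map (fun k : Int => PySem.List.pyGetD oidx k 0)) (p : Int) = none := by
        apply index?_map_eq_none
        intro k hk hcontra
        obtain ⟨hk0, hkn⟩ := (hsimem k).mp hk
        have hkt : k.toNat < oidx.length := by omega
        rw [heval k hk0 hkn hkt] at hcontra
        have hmem2 : oidx[k.toNat] ∈ oidxF vector 0 := List.getElem_mem _
        obtain ⟨q, hq, he, hqnz⟩ := (mem_oidxF vector 0 _).mp hmem2
        have hqp : q = p := by omega
        subst hqp
        exact hqnz hz
      rw [hnone]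
      simp [hz, hp]
    · -- the p-th entry is the jn-th non-zero value
      have hnn : vector.countP (fun v => decide (v ≠ 0)) = n := by
        rw [List.countP_eq_length_filter, hn, hnz]
      have hone : (vector.drop p).countP (fun v => decide (v ≠ 0))
          = (vector.drop (p + 1)).countP (fun v => decide (v ≠ 0)) + 1 := by
        rw [← List.getElem_cons_drop hp, List.countP_cons]
        simp [hz]
      have hsplit : vector.countP (fun v => decide (v ≠ 0))
          = jn + (vector.drop p).countP (fun v => decide (v ≠ 0)) := by
        rw [hjn, ← List.countP_append, List.take_append_drop]
      have hjn_lt : jn < n := by omega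
      have hjn_len : jn < oidx.length := by omega
      have hjmem : ((jn : Nat) : Int) ∈ si := (hsimem _).mpr ⟨by omega, by omega⟩
      have h2 : oidx[jn]? = some ((0 : Int) + p) := by
        rw [hoidx, hjn]; exact getElem?_oidxF vector 0 p hp hz
      rw [List.getElem?_eq_getElem hjn_len] at h2
      have h3 := Option.some.inj h2
      have hoval : PySem.List.pyGetD oidx ((jn : Nat) : Int) 0 = (p : Int) := by
        have ht : ((jn : Nat) : Int).toNat < oidx.length := by omega
        rw [heval _ (by omega) (by omega) ht]
        have : ((jn : Nat) : Int).toNat = jn := by omega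
        simp only [this]
        omega
      have huniq : ∀ k ∈ si, PySem.List.pyGetD oidx k 0 = (p : Int) →
          k = ((jn : Nat) : Int) := by
        intro k hk hkp
        obtain ⟨hk0, hkn⟩ := (hsimem k).mp hk
        have hkt : k.toNat < oidx.length := by omega
        rw [heval k hk0 hkn hkt] at hkp
        have heq : oidx[k.toNat] = oidx[jn] := by omega
        have := (hoidxnodup.getElem_inj_iff).mp heq
        omega
      rw [index?_map_of_unique hjmem hoval huniq]
      have hsome : (PySem.List.index? si ((jn : Nat) : Int)).isSome :=
        (PySem.List.index?_isSome_iff _ _).mpr hjmem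
      obtain ⟨r, hr⟩ := Option.isSome_iff_exists.mp hsome
      rw [hr]
      simp [hz]
  · rw [List.getElem?_eq_none (by omega), List.getElem?_eq_none (by omega)]

-- ===== VERDICT (by name: the statement is the Claim_ definition above) =====
theorem replace_non_zero_with_order_spec : Claim_equal_replace_non_zero_with_order := by
  intro vector _
  unfold Spec_replace_non_zero_with_order
  exact main_eq vector
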